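-- pv_equiv track=rewrite | github.com/SirArchy/CoMa-2 | WIP/CoMa_Proggen_HA7.py | _is_triangulation
-- ===== SOURCE A (Python) =====
-- def _is_triangulation(triangles, n):
--     # Überprüfe, ob die gegebenen Dreiecke eine gültige Triangulierung beschreiben
--     # Überprüfe, ob die Eckpunkte von 0 bis n-1 nummeriert sind
--     for tri in triangles:
--         if max(tri) >= n or min(tri) < 0:
--             return False
--     # Überprüfe, ob jede Kante genau einem Dreieck gehört
--     edges = set()
--     for tri in triangles:
--         for i in range(3):
--             edge = tuple(sorted([tri[i], tri[(i+1)%3]]))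
--             if edge in edges:
--                 return False
--             else:
--                 edges.add(edge)
--     # Überprüfe, ob die Dreiecke eine zusammenhängende Region bilden
--     visited = set()
--     stack = [0]
--     while stack:
--         v = stack.pop()
--         visited.add(v)
--         for tri in triangles:
--             if v in tri:
--                 for w in tri:
--                     if w != v and w not in visited:
--                         stack.append(w)
--     if visited != set(range(n)):
--         return False
--     return True
-- ===== SOURCE B (Python) =====
-- def _is_triangulation(triangles, n):
--     # vertex range check: every vertex must lie in 0..n-1
--     if any(v < 0 or v >= n for tri in triangles for v in tri):
--         return False
--     # edge uniqueness: collect every (normalised) edge once, then compare counts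
--     edges = [(a, b) if a <= b else (b, a)
--              for tri in triangles
--              for a, b in ((tri[0], tri[1]), (tri[1], tri[2]), (tri[2], tri[0]))]
--     if len(set(edges)) != len(edges):
--         return False
--     # connectivity: build the vertex adjacency index once, then a single BFS from 0
--     adj = {}
--     for tri in triangles:
--         for v in tri:
--             adj.setdefault(v, set()).update(tri)
--     seen = {0}
--     queue = [0]
--     for v in queue:
--         for w in adj.get(v, ()):
--             if w not in seen:
--                 seen.add(w)
--                 queue.append(w)
--     return seen == set(range(n))
-- ===== Notes on version B (the rewrite author's own statement) =====
-- stated objective: alternative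
-- what changed: B builds a vertex-adjacency index once and runs a single BFS instead of A's DFS that rescans every triangle for each popped vertex, and B tests edge uniqueness by one len(set(edges))==len(edges) comparison on the collected normalised edge list instead of A's incremental membership-then-add loop; it trades A's repeated scans for precomputed lookup structures (a gain only on inputs that reach the connectivity phase).
-- outside the precondition, e.g. on _is_triangulation([[0, 1, 2], [0, 1, 2], [0]], 3): A returns False, B raises IndexError; on _is_triangulation([[0]], 3): A raises IndexError, B raises IndexError
import Mathlib
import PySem

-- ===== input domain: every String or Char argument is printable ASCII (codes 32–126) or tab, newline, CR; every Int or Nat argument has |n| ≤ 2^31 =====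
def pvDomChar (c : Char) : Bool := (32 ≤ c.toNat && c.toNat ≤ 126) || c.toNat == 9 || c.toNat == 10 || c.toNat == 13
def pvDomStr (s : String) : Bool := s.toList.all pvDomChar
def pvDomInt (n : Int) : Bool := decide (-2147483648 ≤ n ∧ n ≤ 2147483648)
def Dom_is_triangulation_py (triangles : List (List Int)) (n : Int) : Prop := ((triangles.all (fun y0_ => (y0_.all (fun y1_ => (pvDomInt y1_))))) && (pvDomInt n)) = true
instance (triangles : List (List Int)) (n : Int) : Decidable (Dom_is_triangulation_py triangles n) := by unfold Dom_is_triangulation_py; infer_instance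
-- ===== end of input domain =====

-- B replaces A's per-vertex rescan of all triangles (DFS) by an adjacency index built once plus a
-- single BFS, and A's incremental edge-set early exit by one duplicate test on the collected edge
-- list; objective: alternative (different traversal and lookup structures, same results).


-- ===== PORT A =====

-- tuple(sorted([a, b])) on two ints (A) / '(a, b) if a <= b else (b, a)' (B)
def pvSortPair (a b : Int) : Int × Int := if a ≤ b then (a, b) else (b, a)

-- 'for tri in triangles: if max(tri) >= n or min(tri) < 0: return False'
def pvA_rangeLoop (n : Int) : List (List Int) → Bool
  | [] => true
  | tri :: rest =>
    match PySem.List.max? tri (fun x => x), PySem.List.min? tri (fun x => x) with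
    | some mx, some mn => if n ≤ mx || mn < 0 then false else pvA_rangeLoop n rest
    | _, _ => false  -- max()/min() of an empty list: ValueError (outside Pre_)

-- inner 'for i in range(3)' over one triangle; 'none' = 'return False'
def pvA_edgeInner (tri : List Int) (edges : PySem.Set (Int × Int)) :
    List Int → Option (PySem.Set (Int × Int))
  | [] => some edges
  | i :: is =>
    match PySem.List.pyGet? tri i, PySem.List.pyGet? tri (PySem.Int.mod (i + 1) 3) with
    | some a, some b =>
      if PySem.Set.contains edges (pvSortPair a b) then none
      else pvA_edgeInner tri (PySem.Set.add edges (pvSortPair a b)) is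
    | _, _ => none  -- IndexError on a short triangle (outside Pre_)

-- 'for tri in triangles: for i in range(3): …'
def pvA_edgeLoop (edges : PySem.Set (Int × Int)) :
    List (List Int) → Option (PySem.Set (Int × Int))
  | [] => some edges
  | tri :: rest =>
    match pvA_edgeInner tri edges (PySem.List.pyRange 0 3 1) with
    | none => none
    | some edges' => pvA_edgeLoop edges' rest

-- the vertices appended while popping v: 'for tri in triangles: if v in tri: for w in tri: …'
def pvA_succs (ts : List (List Int)) (visited : PySem.Set Int) (v : Int) : List Int :=
  ts.foldl (fun acc tri =>
    if v ∈ tri then acc ++ tri.filter (fun w => w != v && !(PySem.Set.contains visited w))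
    else acc) []

theorem pvA_succs_aux (ts : List (List Int)) (vis : PySem.Set Int) (v w : Int) :
    ∀ acc : List Int,
      (w ∈ ts.foldl (fun acc tri =>
          if v ∈ tri then acc ++ tri.filter (fun w => w != v && !(PySem.Set.contains vis w))
          else acc) acc
        ↔ w ∈ acc ∨ ∃ tri ∈ ts, v ∈ tri ∧ w ∈ tri ∧ w ≠ v ∧ w ∉ vis) := by
  induction ts with
  | nil => intro acc; simp
  | cons tri rest ih =>
    intro acc
    simp only [List.foldl_cons]
    by_cases hv : v ∈ tri
    · rw [if_pos hv, ih]
      simp only [List.mem_append, List.mem_filter, Bool.and_eq_true, bne_iff_ne,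
        Bool.not_eq_true', ← Bool.not_eq_true, PySem.Set.contains_iff, List.mem_cons]
      constructor
      · rintro ((h | h) | h)
        · exact Or.inl h
        · exact Or.inr ⟨tri, Or.inl rfl, hv, h.1, h.2.1, h.2.2⟩
        · rcases h with ⟨t, ht, h⟩; exact Or.inr ⟨t, Or.inr ht, h⟩
      · rintro (h | ⟨t, (rfl | ht), h⟩)
        · exact Or.inl (Or.inl h)
        · exact Or.inl (Or.inr ⟨h.2.1, h.2.2.1, h.2.2.2⟩)
        · exact Or.inr ⟨t, ht, h⟩
    · rw [if_neg hv, ih]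
      constructor
      · rintro (h | ⟨t, ht, h⟩)
        · exact Or.inl h
        · exact Or.inr ⟨t, List.mem_cons_of_mem _ ht, h⟩
      · rintro (h | ⟨t, ht, h⟩)
        · exact Or.inl h
        · rcases List.mem_cons.mp ht with rfl | ht'
          · exact absurd h.1 hv
          · exact Or.inr ⟨t, ht', h⟩

theorem mem_pvA_succs (ts : List (List Int)) (vis : PySem.Set Int) (v w : Int) :
    w ∈ pvA_succs ts vis v ↔ ∃ tri ∈ ts, v ∈ tri ∧ w ∈ tri ∧ w ≠ v ∧ w ∉ vis := by
  unfold pvA_succs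
  rw [pvA_succs_aux]
  simp

-- 'while stack: v = stack.pop(); visited.add(v); …' — pops from the END of the list
def pvA_dfs (ts : List (List Int)) (visited : PySem.Set Int) (stack : List Int) :
    PySem.Set Int :=
  if hne : stack = [] then visited
  else
    pvA_dfs ts (PySem.Set.add visited (stack.getLast hne))
      (stack.dropLast ++ pvA_succs ts (PySem.Set.add visited (stack.getLast hne)) (stack.getLast hne))
termination_by ((((ts.flatten ++ stack).toFinset \ visited.toFinset).card,
  (stack.filter (fun x => PySem.Set.contains visited x)).length) : Nat × Nat)
decreasing_by
  have hv : stack.getLast hne ∈ stack := List.getLast_mem hne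
  set v := stack.getLast hne
  have hsub : ∀ x, x ∈ (ts.flatten ++ (stack.dropLast ++ pvA_succs ts (PySem.Set.add visited v) v)).toFinset →
      x ∈ (ts.flatten ++ stack).toFinset := by
    intro x hx
    simp only [List.mem_toFinset, List.mem_append] at hx ⊢
    rcases hx with hx | hx | hx
    · exact Or.inl hx
    · exact Or.inr (List.mem_of_mem_dropLast hx)
    · rcases (mem_pvA_succs ts _ v x).mp hx with ⟨tri, htri, -, hw, -, -⟩
      exact Or.inl (List.mem_flatten.mpr ⟨tri, htri, hw⟩)
  by_cases hmem : v ∈ visited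
  · -- v already visited: the universe cannot grow and the visited entries of the stack shrink
    have hvis : PySem.Set.add visited v = visited := PySem.Set.add_of_mem hmem
    rw [hvis] at hsub ⊢
    have hle : (((ts.flatten ++ (stack.dropLast ++ pvA_succs ts visited v)).toFinset \ visited.toFinset).card)
        ≤ (((ts.flatten ++ stack).toFinset \ visited.toFinset).card) := by
      apply Finset.card_le_card
      intro x hx
      rw [Finset.mem_sdiff] at hx ⊢
      exact ⟨hsub x hx.1, hx.2⟩
    rcases lt_or_eq_of_le hle with hlt | heq
    · exact Prod.Lex.left _ _ hlt
    · rw [heq]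
      apply Prod.Lex.right
      have hstack : stack = stack.dropLast ++ [v] := (List.dropLast_append_getLast hne).symm
      have hfil : (pvA_succs ts visited v).filter (fun x => decide (x ∈ visited)) = [] := by
        rw [List.filter_eq_nil_iff]
        intro w hw
        rcases (mem_pvA_succs ts visited v w).mp hw with ⟨-, -, -, -, -, hnv⟩
        simpa using hnv
      conv_rhs => rw [hstack]
      simp [List.filter_append, hfil, hmem]
  · -- v freshly visited: the unvisited part of the universe strictly shrinks
    apply Prod.Lex.left
    apply Finset.card_lt_card
    constructor
    · intro x hx
      rw [Finset.mem_sdiff] at hx ⊢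
      refine ⟨hsub x hx.1, fun hxv => hx.2 ?_⟩
      simp only [List.mem_toFinset] at hxv ⊢
      exact (PySem.Set.mem_add visited v x).mpr (Or.inl hxv)
    · intro hall
      have hvin : v ∈ (ts.flatten ++ stack).toFinset \ visited.toFinset := by
        rw [Finset.mem_sdiff]
        refine ⟨?_, ?_⟩
        · simp only [List.mem_toFinset, List.mem_append]; exact Or.inr hv
        · simpa [List.mem_toFinset] using hmem
      have := hall hvin
      rw [Finset.mem_sdiff] at this
      exact this.2 (by
        simp only [List.mem_toFinset]
        exact (PySem.Set.mem_add visited v v).mpr (Or.inr rfl))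

-- if visited != set(range(n)): return False / return True;  set(range(n))
def pvRangeSet (n : Int) : PySem.Set Int := PySem.Set.ofList (PySem.List.pyRange 0 n 1)

def is_triangulation_py (triangles : List (List Int)) (n : Int) : Bool :=
  if pvA_rangeLoop n triangles then
    match pvA_edgeLoop PySem.Set.empty triangles with
    | none => false        -- duplicate edge: return False
    | some _ =>
      -- visited = set(); stack = [0]; while stack: …
      PySem.Set.equal (pvA_dfs triangles PySem.Set.empty [0]) (pvRangeSet n)
  else false

-- ===== PORT B =====

-- edges of one triangle, each normalised: (tri[0],tri[1]), (tri[1],tri[2]), (tri[2],tri[0])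
def pvB_edgesOf (tri : List Int) : List (Int × Int) :=
  match tri with
  | a :: b :: c :: _ => [pvSortPair a b, pvSortPair b c, pvSortPair c a]
  | _ => []  -- tri[0]/tri[1]/tri[2]: IndexError in Python (outside Pre_)

-- adj = {}; for tri in triangles: for v in tri: adj.setdefault(v, set()).update(tri)
def pvB_adj (ts : List (List Int)) : PySem.Dict Int (PySem.Set Int) :=
  ts.foldl (fun d tri =>
    tri.foldl (fun d v =>
      PySem.Dict.modify d v PySem.Set.empty (fun s => PySem.Set.update s tri)) d)
    PySem.Dict.empty

-- seen = {0}; queue = [0]; for v in queue: for w in adj.get(v, ()): …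
-- (adj[v] is a Python set: its distinct elements; the unseen ones join seen and the queue)
def pvB_bfs (adj : PySem.Dict Int (PySem.Set Int)) (seen : PySem.Set Int) (todo : List Int) :
    PySem.Set Int :=
  if hne : todo = [] then seen
  else
    pvB_bfs adj
      (PySem.Set.update seen ((PySem.List.dedup (PySem.Dict.getD adj (todo.head hne) PySem.Set.empty)).filter
        (fun w => !(PySem.Set.contains seen w))))
      (todo.tail ++ (PySem.List.dedup (PySem.Dict.getD adj (todo.head hne) PySem.Set.empty)).filter
        (fun w => !(PySem.Set.contains seen w)))
termination_by 2 * (((adj.values.flatten ++ todo).toFinset \ seen.toFinset).card) + todo.length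
decreasing_by
  set v := todo.head hne
  set fresh := (PySem.List.dedup (PySem.Dict.getD adj v PySem.Set.empty)).filter
    (fun w => !(PySem.Set.contains seen w))
  have hnodup : fresh.Nodup := (PySem.List.nodup_dedup _).filter _
  have hfr_univ : ∀ w ∈ fresh, w ∈ adj.values.flatten := by
    intro w hw
    have hmem : w ∈ PySem.Dict.getD adj v PySem.Set.empty :=
      (PySem.List.mem_dedup _ w).mp (List.mem_of_mem_filter hw)
    rw [PySem.Dict.getD_eq_get?_getD] at hmem
    cases hg : PySem.Dict.get? adj v with
    | none => rw [hg] at hmem; simp [PySem.Set.empty] at hmem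
    | some s =>
      rw [hg] at hmem
      refine List.mem_flatten.mpr ⟨s, ?_, hmem⟩
      have : (v, s) ∈ adj.items := PySem.Dict.mem_items_of_get?_eq_some adj hg
      simp only [PySem.Dict.values, List.mem_map]
      exact ⟨(v, s), this, rfl⟩
  have hfr_not_seen : ∀ w ∈ fresh, w ∉ seen := by
    intro w hw
    have := List.of_mem_filter hw
    simpa [PySem.Set.contains_iff] using this
  have hkey : (((adj.values.flatten ++ (todo.tail ++ fresh)).toFinset \ (PySem.Set.update seen fresh).toFinset).card)
      + fresh.length ≤ (((adj.values.flatten ++ todo).toFinset \ seen.toFinset).card) := by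
    have hfF : fresh.toFinset ⊆ (adj.values.flatten ++ todo).toFinset \ seen.toFinset := by
      intro x hx
      rw [List.mem_toFinset] at hx
      rw [Finset.mem_sdiff]
      constructor
      · simp only [List.mem_toFinset, List.mem_append]; exact Or.inl (hfr_univ x hx)
      · simpa [List.mem_toFinset] using hfr_not_seen x hx
    have hsub : (adj.values.flatten ++ (todo.tail ++ fresh)).toFinset \ (PySem.Set.update seen fresh).toFinset
        ⊆ ((adj.values.flatten ++ todo).toFinset \ seen.toFinset) \ fresh.toFinset := by
      intro x hx
      rw [Finset.mem_sdiff] at hx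
      rw [Finset.mem_sdiff, Finset.mem_sdiff]
      have hx1 := hx.1
      simp only [List.mem_toFinset, List.mem_append] at hx1
      have hnupd := hx.2
      simp only [List.mem_toFinset, PySem.Set.mem_update] at hnupd
      push Not at hnupd
      refine ⟨⟨?_, by simpa [List.mem_toFinset] using hnupd.1⟩,
        by simpa [List.mem_toFinset] using hnupd.2⟩
      simp only [List.mem_toFinset, List.mem_append]
      rcases hx1 with h | h | h
      · exact Or.inl h
      · exact Or.inr (List.mem_of_mem_tail h)
      · exact Or.inl (hfr_univ x h)
    have hlen : fresh.toFinset.card = fresh.length := List.toFinset_card_of_nodup hnodup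
    have h1 := Finset.card_le_card hsub
    rw [Finset.card_sdiff_of_subset hfF] at h1
    have h2 := Finset.card_le_card hfF
    omega
  have hlen : 0 < todo.length := List.length_pos_iff.mpr hne
  simp only [List.length_append, List.length_tail]
  omega

def is_triangulation_py_alt (triangles : List (List Int)) (n : Int) : Bool :=
  if triangles.any (fun tri => tri.any (fun v => v < 0 || n ≤ v)) then false
  else
    if (PySem.Set.ofList (triangles.flatMap pvB_edgesOf)).length ≠ (triangles.flatMap pvB_edgesOf).length then false
    else
      PySem.Set.equal (pvB_bfs (pvB_adj triangles) (PySem.Set.ofList [0]) [0]) (pvRangeSet n)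

-- ===== PRECONDITION & SPEC =====
-- Pre_ admits the natural domain (every triangle has at least its 3 vertices) and, in addition,
-- every input that A's first loop rejects (an out-of-range vertex in a nonempty triangle, with
-- only in-range nonempty triangles before it) — there both programs return False. Excluded are the
-- remaining malformed inputs, where A raises ValueError/IndexError except when a duplicate edge
-- makes it return False just before reaching a short triangle (see claim.json cites).
def Pre_is_triangulation_py (triangles : List (List Int)) (n : Int) : Prop :=
  (∀ tri ∈ triangles, 3 ≤ tri.length) ∨
  (∃ k < triangles.length,
    (triangles[k]! ≠ [] ∧ ∃ v ∈ triangles[k]!, v < 0 ∨ n ≤ v) ∧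
    ∀ j < k, triangles[j]! ≠ [] ∧ ∀ v ∈ triangles[j]!, 0 ≤ v ∧ v < n)
instance (triangles : List (List Int)) (n : Int) : Decidable (Pre_is_triangulation_py triangles n) := by
  unfold Pre_is_triangulation_py; infer_instance

def pvWitness_is_triangulation_py : List (List Int) × Int := ([[0, 1, 2]], 3)

def Spec_is_triangulation_py (triangles : List (List Int)) (n : Int) (out : Bool) : Prop :=
  out = is_triangulation_py_alt triangles n
instance (triangles : List (List Int)) (n : Int) (out : Bool) : Decidable (Spec_is_triangulation_py triangles n out) := by
  unfold Spec_is_triangulation_py; infer_instance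

-- ===== CLAIM (what is proved, stated in full; the proofs are below) =====
def Claim_equal_is_triangulation_py : Prop := ∀ (triangles : List (List Int)) (n : Int), Dom_is_triangulation_py triangles n → Pre_is_triangulation_py triangles n → Spec_is_triangulation_py triangles n (is_triangulation_py triangles n)

-- ===== LEMMAS AND PROOFS =====

theorem pv_rangeLoop_eq (n : Int) (ts : List (List Int)) (h3 : ∀ tri ∈ ts, 3 ≤ tri.length) :
    pvA_rangeLoop n ts = !(ts.any (fun tri => tri.any (fun v => v < 0 || n ≤ v))) := by
  induction ts with
  | nil => simp [pvA_rangeLoop]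
  | cons tri rest ih =>
    have hne : tri ≠ [] := by
      intro h; have := h3 tri (List.mem_cons_self); simp [h] at this
    cases hmx : PySem.List.max? tri (fun x => x) with
    | none => exact absurd ((PySem.List.max?_eq_none_iff tri _).mp hmx) hne
    | some mx =>
      cases hmn : PySem.List.min? tri (fun x => x) with
      | none => exact absurd ((PySem.List.min?_eq_none_iff tri _).mp hmn) hne
      | some mn =>
        simp only [pvA_rangeLoop, hmx, hmn]
        have hiff : (n ≤ mx || mn < 0) = tri.any (fun v => v < 0 || n ≤ v) := by
          rw [Bool.eq_iff_iff]
          simp only [Bool.or_eq_true, decide_eq_true_eq, List.any_eq_true]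
          constructor
          · rintro (h | h)
            · exact ⟨mx, PySem.List.max?_mem hmx, Or.inr h⟩
            · exact ⟨mn, PySem.List.min?_mem hmn, Or.inl h⟩
          · rintro ⟨x, hx, h | h⟩
            · exact Or.inr (lt_of_le_of_lt (PySem.List.min?_isMin hmn x hx) h)
            · exact Or.inl (le_trans h (PySem.List.max?_isMax hmx x hx))
        rw [hiff]
        cases h : tri.any (fun v => v < 0 || n ≤ v) with
        | true => simp [h]
        | false => simp [h, ih (fun t ht => h3 t (List.mem_cons_of_mem _ ht))]

-- A's first loop returns False at index k when triangle k is nonempty and out of range and all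
-- earlier triangles are nonempty and in range
theorem pv_rangeLoop_false (n : Int) : ∀ (ts : List (List Int)) (k : Nat), k < ts.length →
    ts[k]! ≠ [] → (∃ v ∈ ts[k]!, v < 0 ∨ n ≤ v) →
    (∀ j < k, ts[j]! ≠ [] ∧ ∀ v ∈ ts[j]!, 0 ≤ v ∧ v < n) →
    pvA_rangeLoop n ts = false := by
  intro ts
  induction ts with
  | nil => intro k hk; simp at hk
  | cons tri rest ih =>
    intro k hk hne hbad hgood
    cases k with
    | zero =>
      simp only [List.getElem!_cons_zero] at hne hbad
      cases hmx : PySem.List.max? tri (fun x => x) with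
      | none => exact absurd ((PySem.List.max?_eq_none_iff tri _).mp hmx) hne
      | some mx =>
        cases hmn : PySem.List.min? tri (fun x => x) with
        | none => exact absurd ((PySem.List.min?_eq_none_iff tri _).mp hmn) hne
        | some mn =>
          obtain ⟨v, hv, hvb⟩ := hbad
          have hcond : (n ≤ mx || mn < 0) = true := by
            simp only [Bool.or_eq_true, decide_eq_true_eq]
            rcases hvb with h | h
            · exact Or.inr (lt_of_le_of_lt (PySem.List.min?_isMin hmn v hv) h)
            · exact Or.inl (le_trans h (PySem.List.max?_isMax hmx v hv))
          simp [pvA_rangeLoop, hmx, hmn, hcond]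
    | succ k =>
      have h0 := hgood 0 (Nat.succ_pos k)
      simp only [List.getElem!_cons_zero] at h0
      obtain ⟨hne0, hgood0⟩ := h0
      cases hmx : PySem.List.max? tri (fun x => x) with
      | none => exact absurd ((PySem.List.max?_eq_none_iff tri _).mp hmx) hne0
      | some mx =>
        cases hmn : PySem.List.min? tri (fun x => x) with
        | none => exact absurd ((PySem.List.min?_eq_none_iff tri _).mp hmn) hne0
        | some mn =>
          have hcond : (n ≤ mx || mn < 0) = false := by
            simp only [Bool.or_eq_false_iff, decide_eq_false_iff_not, not_le, not_lt]
            exact ⟨(hgood0 mx (PySem.List.max?_mem hmx)).2, (hgood0 mn (PySem.List.min?_mem hmn)).1⟩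
          simp only [pvA_rangeLoop, hmx, hmn, hcond, Bool.false_eq_true, if_false]
          refine ih k (by simpa using hk) (by simpa using hne) (by simpa using hbad) ?_
          intro j hj
          have := hgood (j + 1) (Nat.succ_lt_succ hj)
          simpa using this

-- the sequential 'check membership then add' loop over a list of edges
def pvChk (es : List (Int × Int)) (s : PySem.Set (Int × Int)) : Option (PySem.Set (Int × Int)) :=
  match es with
  | [] => some s
  | e :: r => if PySem.Set.contains s e then none else pvChk r (PySem.Set.add s e)

theorem pv_edgeInner_eq (tri : List Int) (s : PySem.Set (Int × Int)) (h3 : 3 ≤ tri.length) :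
    pvA_edgeInner tri s (PySem.List.pyRange 0 3 1) = pvChk (pvB_edgesOf tri) s := by
  rcases tri with _ | ⟨a, _ | ⟨b, _ | ⟨c, r⟩⟩⟩ <;> simp at h3
  rw [show PySem.List.pyRange 0 3 1 = [0, 1, 2] from by decide]
  have g0 : PySem.List.pyGet? (a :: b :: c :: r) (0 : Int) = some a := by
    simp [PySem.List.pyGet?, PySem.List.pyIdx?]
    rw [if_pos (by omega)]
    rfl
  have g1 : PySem.List.pyGet? (a :: b :: c :: r) (1 : Int) = some b := by
    simp [PySem.List.pyGet?, PySem.List.pyIdx?]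
    rw [if_pos (by omega)]
    rfl
  have g2 : PySem.List.pyGet? (a :: b :: c :: r) (2 : Int) = some c := by
    simp [PySem.List.pyGet?, PySem.List.pyIdx?]
    rw [if_pos (by omega)]
    rfl
  have m0 : PySem.Int.mod ((0 : Int) + 1) 3 = 1 := by decide
  have m1 : PySem.Int.mod ((1 : Int) + 1) 3 = 2 := by decide
  have m2 : PySem.Int.mod ((2 : Int) + 1) 3 = 0 := by decide
  simp only [pvA_edgeInner, pvB_edgesOf, pvChk, m0, m1, m2, g0, g1, g2]

theorem pvChk_append (xs ys : List (Int × Int)) : ∀ s,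
    pvChk (xs ++ ys) s = (pvChk xs s).bind (fun s' => pvChk ys s') := by
  induction xs with
  | nil => intro s; simp [pvChk]
  | cons e r ih =>
    intro s
    simp only [List.cons_append, pvChk]
    split
    · rfl
    · exact ih _

theorem pv_edgeLoop_eq (ts : List (List Int)) (s : PySem.Set (Int × Int))
    (h3 : ∀ tri ∈ ts, 3 ≤ tri.length) :
    pvA_edgeLoop s ts = pvChk (ts.flatMap pvB_edgesOf) s := by
  induction ts generalizing s with
  | nil => simp [pvA_edgeLoop, pvChk]
  | cons tri rest ih =>
    simp only [pvA_edgeLoop, List.flatMap_cons, pvChk_append]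
    rw [pv_edgeInner_eq tri s (h3 tri (List.mem_cons_self))]
    cases pvChk (pvB_edgesOf tri) s with
    | none => rfl
    | some s' => exact ih s' (fun t ht => h3 t (List.mem_cons_of_mem _ ht))

theorem pvChk_isSome (es : List (Int × Int)) : ∀ s : PySem.Set (Int × Int),
    (pvChk es s).isSome ↔ es.Nodup ∧ ∀ e ∈ es, e ∉ s := by
  induction es with
  | nil => intro s; simp [pvChk]
  | cons e r ih =>
    intro s
    simp only [pvChk]
    by_cases he : e ∈ s
    · rw [if_pos ((PySem.Set.contains_iff s e).mpr he)]
      simp only [Option.isSome_none, Bool.false_eq_true, false_iff]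
      rintro ⟨-, hall⟩
      exact hall e (List.mem_cons_self) he
    · rw [if_neg (by simpa [PySem.Set.contains_iff] using he), ih]
      simp only [List.nodup_cons, List.mem_cons]
      constructor
      · rintro ⟨hnd, hall⟩
        have her : e ∉ r := fun hc => by
          have := hall e hc
          exact this ((PySem.Set.mem_add s e e).mpr (Or.inr rfl))
        refine ⟨⟨her, hnd⟩, ?_⟩
        rintro x (rfl | hx)
        · exact he
        · exact fun hc => (hall x hx) ((PySem.Set.mem_add s e x).mpr (Or.inl hc))
      · rintro ⟨⟨her, hnd⟩, hall⟩
        refine ⟨hnd, fun x hx hc => ?_⟩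
        rcases (PySem.Set.mem_add s e x).mp hc with h | rfl
        · exact hall x (Or.inr hx) h
        · exact her hx

theorem pv_ofList_sublist {α : Type} [BEq α] [LawfulBEq α] (xs : List α) :
    (PySem.Set.ofList xs).Sublist xs := by
  induction xs with
  | nil => simp [PySem.Set.ofList]
  | cons x xs ih =>
    rw [PySem.Set.ofList_cons]
    refine List.Sublist.cons₂ x ?_
    refine List.Sublist.trans ?_ ih
    unfold PySem.Set.discard
    exact List.filter_sublist

theorem pv_ofList_length_iff {α : Type} [BEq α] [LawfulBEq α] (xs : List α) :
    (PySem.Set.ofList xs).length = xs.length ↔ xs.Nodup := by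
  constructor
  · intro h
    have heq : PySem.Set.ofList xs = xs := (pv_ofList_sublist xs).eq_of_length h
    rw [← heq]
    exact PySem.Set.nodup_ofList xs
  · intro h
    rw [PySem.Set.ofList_eq_self_of_nodup xs h]

-- the relation both traversals close over: reachable from 0 through triangle cliques
inductive pvReach (ts : List (List Int)) : Int → Prop where
  | zero : pvReach ts 0
  | step {v w : Int} {tri : List Int} : pvReach ts v → tri ∈ ts → v ∈ tri → w ∈ tri → w ≠ v →
      pvReach ts w

def pvInvA (ts : List (List Int)) (visited : PySem.Set Int) (stack : List Int) : Prop :=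
  (∀ x ∈ visited, pvReach ts x) ∧ (∀ x ∈ stack, pvReach ts x) ∧
  (0 ∈ visited ∨ 0 ∈ stack) ∧
  (∀ u ∈ visited, ∀ tri ∈ ts, u ∈ tri → ∀ w ∈ tri, w ≠ u → w ∈ visited ∨ w ∈ stack)

theorem pvA_dfs_spec (ts : List (List Int)) : ∀ (visited : PySem.Set Int) (stack : List Int),
    pvInvA ts visited stack → ∀ x, (x ∈ pvA_dfs ts visited stack ↔ pvReach ts x) := by
  intro visited stack
  induction visited, stack using pvA_dfs.induct ts with
  | case1 visited =>
    intro hinv x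
    rw [pvA_dfs]
    rw [dif_pos rfl]
    obtain ⟨hs1, _, hs3, hs4⟩ := hinv
    constructor
    · exact hs1 x
    · intro hr
      induction hr with
      | zero =>
        rcases hs3 with h | h
        · exact h
        · simp at h
      | step hv htri hvtri hwtri hne ih =>
        rcases hs4 _ ih _ htri hvtri _ hwtri hne with h | h
        · exact h
        · simp at h
  | case2 visited stack hne ih =>
    intro hinv x
    rw [pvA_dfs]
    simp only [dif_neg hne]
    obtain ⟨hs1, hs2, hs3, hs4⟩ := hinv
    set v := stack.getLast hne with hv
    have hvmem : v ∈ stack := List.getLast_mem hne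
    have hreachv : pvReach ts v := hs2 v hvmem
    apply ih
    refine ⟨?_, ?_, ?_, ?_⟩
    · intro x hx
      rcases (PySem.Set.mem_add visited v x).mp hx with h | rfl
      · exact hs1 x h
      · exact hreachv
    · intro x hx
      rcases List.mem_append.mp hx with h | h
      · exact hs2 x (List.mem_of_mem_dropLast h)
      · rcases (mem_pvA_succs ts _ v x).mp h with ⟨tri, htri, hvtri, hwtri, hne2, -⟩
        exact pvReach.step hreachv htri hvtri hwtri hne2
    · rcases hs3 with h | h
      · exact Or.inl ((PySem.Set.mem_add visited v 0).mpr (Or.inl h))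
      · rw [← List.dropLast_append_getLast hne] at h
        rcases List.mem_append.mp h with h | h
        · exact Or.inr (List.mem_append.mpr (Or.inl h))
        · exact Or.inl ((PySem.Set.mem_add visited v 0).mpr (Or.inr (List.mem_singleton.mp h)))
    · intro u hu tri htri hutri w hwtri hwu
      rcases (PySem.Set.mem_add visited v u).mp hu with hu' | rfl
      · rcases hs4 u hu' tri htri hutri w hwtri hwu with h | h
        · exact Or.inl ((PySem.Set.mem_add visited v w).mpr (Or.inl h))
        · rw [← List.dropLast_append_getLast hne] at h
          rcases List.mem_append.mp h with h | h
          · exact Or.inr (List.mem_append.mpr (Or.inl h))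
          · exact Or.inl ((PySem.Set.mem_add visited v w).mpr (Or.inr (List.mem_singleton.mp h)))
      · by_cases hwv : w ∈ PySem.Set.add visited v
        · exact Or.inl hwv
        · exact Or.inr (List.mem_append.mpr (Or.inr
            ((mem_pvA_succs ts _ v w).mpr ⟨tri, htri, hutri, hwtri, hwu, hwv⟩)))

theorem pvB_adj_inner (tri : List Int) (w : Int) : ∀ (us : List Int)
    (d : PySem.Dict Int (PySem.Set Int)) (v : Int),
    w ∈ PySem.Dict.getD (us.foldl (fun d u =>
        PySem.Dict.modify d u PySem.Set.empty (fun s => PySem.Set.update s tri)) d) v PySem.Set.empty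
      ↔ w ∈ PySem.Dict.getD d v PySem.Set.empty ∨ (v ∈ us ∧ w ∈ tri) := by
  intro us
  induction us with
  | nil => intro d v; simp
  | cons u us ih =>
    intro d v
    rw [List.foldl_cons, ih]
    rw [PySem.Dict.getD_modify]
    by_cases hvu : v = u
    · subst hvu
      rw [if_pos rfl]
      simp only [PySem.Set.mem_update, List.mem_cons]
      tauto
    · rw [if_neg hvu]
      simp only [List.mem_cons]
      tauto

theorem pvB_adj_outer (w : Int) (ts : List (List Int)) : ∀ (d : PySem.Dict Int (PySem.Set Int)) (v : Int),
    w ∈ PySem.Dict.getD (ts.foldl (fun d tri =>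
        tri.foldl (fun d v =>
          PySem.Dict.modify d v PySem.Set.empty (fun s => PySem.Set.update s tri)) d) d) v PySem.Set.empty
      ↔ w ∈ PySem.Dict.getD d v PySem.Set.empty ∨ ∃ tri ∈ ts, v ∈ tri ∧ w ∈ tri := by
  induction ts with
  | nil => intro d v; simp
  | cons tri rest ih =>
    intro d v
    rw [List.foldl_cons, ih, pvB_adj_inner]
    simp only [List.mem_cons]
    constructor
    · rintro ((h | h) | ⟨t, ht, h⟩)
      · exact Or.inl h
      · exact Or.inr ⟨tri, Or.inl rfl, h⟩
      · exact Or.inr ⟨t, Or.inr ht, h⟩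
    · rintro (h | ⟨t, (rfl | ht), h⟩)
      · exact Or.inl (Or.inl h)
      · exact Or.inl (Or.inr h)
      · exact Or.inr ⟨t, ht, h⟩

theorem pvB_adj_mem (ts : List (List Int)) (v w : Int) :
    w ∈ PySem.Dict.getD (pvB_adj ts) v PySem.Set.empty ↔ ∃ tri ∈ ts, v ∈ tri ∧ w ∈ tri := by
  unfold pvB_adj
  rw [pvB_adj_outer]
  simp [PySem.Set.empty]

def pvInvB (ts : List (List Int)) (adj : PySem.Dict Int (PySem.Set Int))
    (seen : PySem.Set Int) (todo : List Int) : Prop :=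
  (∀ x ∈ seen, pvReach ts x) ∧ (∀ x ∈ todo, x ∈ seen) ∧ (0 ∈ seen) ∧
  (∀ u ∈ seen, u ∉ todo → ∀ w ∈ PySem.Dict.getD adj u PySem.Set.empty, w ∈ seen)

theorem pvB_bfs_spec (ts : List (List Int)) (adj : PySem.Dict Int (PySem.Set Int))
    (hadj : ∀ v w, w ∈ PySem.Dict.getD adj v PySem.Set.empty ↔ ∃ tri ∈ ts, v ∈ tri ∧ w ∈ tri) :
    ∀ (seen : PySem.Set Int) (todo : List Int), pvInvB ts adj seen todo →
    ∀ x, (x ∈ pvB_bfs adj seen todo ↔ pvReach ts x) := by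
  intro seen todo
  induction seen, todo using pvB_bfs.induct adj with
  | case1 seen =>
    intro hinv x
    rw [pvB_bfs]
    rw [dif_pos rfl]
    obtain ⟨hb1, -, hb3, hb4⟩ := hinv
    constructor
    · exact hb1 x
    · intro hr
      induction hr with
      | zero => exact hb3
      | step hv htri hvtri hwtri hne ih =>
        exact hb4 _ ih (by simp) _ ((hadj _ _).mpr ⟨_, htri, hvtri, hwtri⟩)
  | case2 seen todo hne ih =>
    intro hinv x
    rw [pvB_bfs]
    simp only [dif_neg hne]
    obtain ⟨hb1, hb2, hb3, hb4⟩ := hinv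
    set v := todo.head hne with hv
    set fresh := (PySem.List.dedup (PySem.Dict.getD adj v PySem.Set.empty)).filter
      (fun w => !(PySem.Set.contains seen w)) with hfresh
    have hvseen : v ∈ seen := hb2 v (List.head_mem hne)
    have hreachv : pvReach ts v := hb1 v hvseen
    have hfr : ∀ w ∈ fresh, w ∈ PySem.Dict.getD adj v PySem.Set.empty ∧ w ∉ seen := by
      intro w hw
      refine ⟨(PySem.List.mem_dedup _ w).mp (List.mem_of_mem_filter hw), ?_⟩
      have := List.of_mem_filter hw
      simpa [PySem.Set.contains_iff] using this
    apply ih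
    refine ⟨?_, ?_, ?_, ?_⟩
    · intro x hx
      rcases (PySem.Set.mem_update seen fresh x).mp hx with h | h
      · exact hb1 x h
      · rcases (hadj v x).mp (hfr x h).1 with ⟨tri, htri, hvtri, hxtri⟩
        by_cases hxv : x = v
        · exact hxv ▸ hreachv
        · exact pvReach.step hreachv htri hvtri hxtri hxv
    · intro x hx
      rcases List.mem_append.mp hx with h | h
      · exact (PySem.Set.mem_update seen fresh x).mpr (Or.inl (hb2 x (List.mem_of_mem_tail h)))
      · exact (PySem.Set.mem_update seen fresh x).mpr (Or.inr h)
    · exact (PySem.Set.mem_update seen fresh 0).mpr (Or.inl hb3)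
    · intro u hu hnt w hw
      rcases (PySem.Set.mem_update seen fresh u).mp hu with hu' | hu'
      · have hutail : u ∉ todo.tail := fun hc => hnt (List.mem_append.mpr (Or.inl hc))
        by_cases huv : u = v
        · subst huv
          by_cases hws : w ∈ seen
          · exact (PySem.Set.mem_update seen fresh w).mpr (Or.inl hws)
          · refine (PySem.Set.mem_update seen fresh w).mpr (Or.inr ?_)
            rw [hfresh]
            refine List.mem_filter.mpr ⟨(PySem.List.mem_dedup _ w).mpr hw, ?_⟩
            simpa [PySem.Set.contains_iff] using hws
        · have hnt' : u ∉ todo := by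
            intro hc
            rw [← List.cons_head_tail hne] at hc
            rcases List.mem_cons.mp hc with h | h
            · exact huv h
            · exact hutail h
          exact (PySem.Set.mem_update seen fresh w).mpr (Or.inl (hb4 u hu' hnt' w hw))
      · exact absurd (List.mem_append.mpr (Or.inr hu')) hnt

theorem pv_equal_congr (s s' t : PySem.Set Int) (h : ∀ x, x ∈ s ↔ x ∈ s') :
    PySem.Set.equal s t = PySem.Set.equal s' t := by
  by_cases h1 : PySem.Set.equal s t = true
  · rw [h1]
    symm
    rw [PySem.Set.equal_iff]
    intro x
    rw [← h x]
    exact (PySem.Set.equal_iff s t).mp h1 x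
  · have h2 : PySem.Set.equal s' t ≠ true := fun hc =>
      h1 ((PySem.Set.equal_iff s t).mpr (fun x => (h x).trans ((PySem.Set.equal_iff s' t).mp hc x)))
    simp only [Bool.not_eq_true] at h1 h2
    rw [h1, h2]

theorem pvInvA_init (ts : List (List Int)) : pvInvA ts PySem.Set.empty [0] := by
  refine ⟨?_, ?_, Or.inr (by simp), ?_⟩
  · intro x hx; simp [PySem.Set.empty] at hx
  · intro x hx
    rw [List.mem_singleton] at hx
    exact hx ▸ pvReach.zero
  · intro u hu; simp [PySem.Set.empty] at hu

theorem pvInvB_init (ts : List (List Int)) (adj : PySem.Dict Int (PySem.Set Int)) :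
    pvInvB ts adj (PySem.Set.ofList [0]) [0] := by
  refine ⟨?_, ?_, by simp [PySem.Set.ofList, PySem.Set.add], ?_⟩
  · intro x hx
    rcases (PySem.Set.mem_ofList [0] x).mp hx with h
    rw [List.mem_singleton] at h
    exact h ▸ pvReach.zero
  · intro x hx
    rw [List.mem_singleton] at hx
    exact (PySem.Set.mem_ofList [0] x).mpr (by simp [hx])
  · intro u hu hnt
    exfalso
    rcases (PySem.Set.mem_ofList [0] u).mp hu with h
    exact hnt (by simpa using h)

-- ===== VERDICT (by name: the statement is the Claim_ definition above) =====
theorem is_triangulation_py_spec : Claim_equal_is_triangulation_py := by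
  intro ts n hdom hpre
  unfold Spec_is_triangulation_py
  unfold is_triangulation_py is_triangulation_py_alt
  rcases hpre with hpre | ⟨k, hk, ⟨hkne, hkbad⟩, hmin⟩
  case inr =>
    have hA := pv_rangeLoop_false n ts k hk hkne hkbad hmin
    have hB : ts.any (fun tri => tri.any (fun v => v < 0 || n ≤ v)) = true := by
      rw [List.any_eq_true]
      refine ⟨ts[k]!, ?_, ?_⟩
      · rw [getElem!_pos ts k hk]
        exact List.getElem_mem hk
      · rw [List.any_eq_true]
        obtain ⟨v, hv, hvb⟩ := hkbad
        exact ⟨v, hv, by simpa using hvb⟩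
    rw [hA, hB]
    simp
  rw [pv_rangeLoop_eq n ts hpre]
  cases hA : ts.any (fun tri => tri.any (fun v => v < 0 || n ≤ v)) with
  | true => simp
  | false =>
    simp only [Bool.not_false, if_true, Bool.false_eq_true, if_false]
    rw [pv_edgeLoop_eq ts PySem.Set.empty hpre]
    by_cases hnd : (ts.flatMap pvB_edgesOf).Nodup
    · have hsome : (pvChk (ts.flatMap pvB_edgesOf) PySem.Set.empty).isSome :=
        (pvChk_isSome _ _).mpr ⟨hnd, by intro e he h; simp [PySem.Set.empty] at h⟩
      obtain ⟨s', hs'⟩ := Option.isSome_iff_exists.mp hsome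
      rw [hs']
      have hlen : (PySem.Set.ofList (ts.flatMap pvB_edgesOf)).length = (ts.flatMap pvB_edgesOf).length :=
        (pv_ofList_length_iff _).mpr hnd
      rw [if_neg (by simpa using hlen)]
      apply pv_equal_congr
      intro x
      rw [pvA_dfs_spec ts PySem.Set.empty [0] (pvInvA_init ts) x,
        pvB_bfs_spec ts (pvB_adj ts) (pvB_adj_mem ts) (PySem.Set.ofList [0]) [0]
          (pvInvB_init ts (pvB_adj ts)) x]
    · have hnone : pvChk (ts.flatMap pvB_edgesOf) PySem.Set.empty = none := by
        cases hc : pvChk (ts.flatMap pvB_edgesOf) PySem.Set.empty with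
        | none => rfl
        | some s' =>
          exact absurd ((pvChk_isSome _ _).mp (by rw [hc]; rfl)).1 hnd
      rw [hnone]
      have hne : (PySem.Set.ofList (ts.flatMap pvB_edgesOf)).length ≠ (ts.flatMap pvB_edgesOf).length :=
        fun hc => hnd ((pv_ofList_length_iff _).mp hc)
      rw [if_pos (by simpa using hne)]
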